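-- pv_equiv track=rewrite | github.com/Grimmins/Feu | feu05.py | create_graph_from_maze
-- ===== SOURCE A (Python) =====
-- def create_graph_from_maze(maze, freeChar, startChar, exitChar):
--     graph = {}
--     rows = len(maze)
--     cols = len(maze[0])
--
--     for row in range(rows):
--         for col in range(cols):
--             if maze[row][col] in [freeChar, startChar, exitChar]:
--                 node = (row, col)
--                 graph[node] = []
--
--                 neighbors = [(row - 1, col), (row + 1, col), (row, col - 1), (row, col + 1)]
--                 for neighbor in neighbors:
--                     n_row, n_col = neighbor
--                     if 0 <= n_row < rows and 0 <= n_col < cols and maze[n_row][n_col] in [freeChar, startChar, exitChar]: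
--                         graph[node].append(neighbor)
--     return graph
-- ===== SOURCE B (Python) =====
-- def create_graph_from_maze(maze, freeChar, startChar, exitChar):
--     # Edge-scan construction: collect the passable cells, then insert each
--     # grid edge symmetrically into both endpoints' adjacency lists.
--     # Vertical edges (scanned top-down) give each node its up- then down-
--     # neighbor; horizontal edges (scanned left-right) then add left and right.
--     passable = (freeChar, startChar, exitChar)
--     rows, cols = len(maze), len(maze[0])
--     graph = {}
--     for r in range(rows):
--         for c in range(cols):
--             if maze[r][c] in passable:
--                 graph[(r, c)] = []
--     for r in range(rows - 1):
--         for c in range(cols):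
--             if (r, c) in graph and (r + 1, c) in graph:
--                 graph[(r, c)].append((r + 1, c))
--                 graph[(r + 1, c)].append((r, c))
--     for r in range(rows):
--         for c in range(cols - 1):
--             if (r, c) in graph and (r, c + 1) in graph:
--                 graph[(r, c)].append((r, c + 1))
--                 graph[(r, c + 1)].append((r, c))
--     return graph
-- ===== Notes on version B (the rewrite author's own statement) =====
-- stated objective: alternative
-- what changed: Replaces A's per-node scan (each cell tests its four neighbor candidates with bounds+character checks) by an edge-scan construction in staged passes: one pass registers the passable cells as dict keys, then a pass over vertical grid edges and a pass over horizontal grid edges insert each edge symmetrically into both endpoints' adjacency lists; the scan orders make every node receive up, down, left, right in A's order.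
import Mathlib
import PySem

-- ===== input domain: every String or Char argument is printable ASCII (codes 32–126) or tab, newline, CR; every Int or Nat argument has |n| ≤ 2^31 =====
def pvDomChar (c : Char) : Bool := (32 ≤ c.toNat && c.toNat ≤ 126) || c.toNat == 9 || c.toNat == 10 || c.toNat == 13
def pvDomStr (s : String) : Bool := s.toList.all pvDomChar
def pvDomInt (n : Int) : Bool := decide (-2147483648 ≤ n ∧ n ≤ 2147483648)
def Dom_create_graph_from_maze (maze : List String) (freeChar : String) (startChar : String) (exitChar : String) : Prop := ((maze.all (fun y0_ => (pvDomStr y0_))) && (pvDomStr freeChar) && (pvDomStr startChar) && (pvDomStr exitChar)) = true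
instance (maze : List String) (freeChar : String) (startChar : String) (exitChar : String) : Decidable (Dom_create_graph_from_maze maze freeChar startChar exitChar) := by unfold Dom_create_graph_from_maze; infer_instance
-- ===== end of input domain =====

-- B replaces A's per-node neighbor scan by an edge-scan construction in staged passes:
-- it registers the passable cells as dict keys, then inserts each vertical and each
-- horizontal grid edge symmetrically into both endpoints' adjacency lists
-- (objective: alternative, same asymptotic cost).

-- shared helper: Python's `maze[r][c] in [freeChar, startChar, exitChar]`
-- (a 1-char string equals freeChar iff freeChar is that char; exact via pyGet?)
def pvCell (maze : List String) (f s e : String) (r c : Int) : Bool :=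
  match PySem.List.pyGet? maze r with
  | none => false
  | some row =>
    match PySem.List.pyGet? row.toList c with
    | none => false
    | some ch => String.ofList [ch] == f || String.ofList [ch] == s || String.ofList [ch] == e

-- ===== PORT A =====
-- dict keys (row, col) are pairwise distinct over the loop, so `graph[node] = []`
-- followed by appends is exactly one appended (key, value) item per passable cell.
def create_graph_from_maze (maze : List String) (freeChar : String) (startChar : String) (exitChar : String) : List (Int × Int × List (Int × Int)) :=
  let rows : Int := maze.length
  let cols : Int := ((PySem.List.pyGet? maze 0).getD "").toList.length
  (PySem.List.pyRange 0 rows 1).foldl (fun graph row =>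
    (PySem.List.pyRange 0 cols 1).foldl (fun graph col =>
      if pvCell maze freeChar startChar exitChar row col then
        let neighbors : List (Int × Int) := [(row - 1, col), (row + 1, col), (row, col - 1), (row, col + 1)]
        let adj := neighbors.foldl (fun acc nb =>
          if 0 ≤ nb.1 && nb.1 < rows && 0 ≤ nb.2 && nb.2 < cols &&
             pvCell maze freeChar startChar exitChar nb.1 nb.2
          then acc ++ [nb] else acc) ([] : List (Int × Int))
        graph ++ [(row, col, adj)]
      else graph) graph) []

-- ===== PORT B =====
-- port of Source B: dict of passable cells built first, then the vertical-edge pass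
-- and the horizontal-edge pass append each edge into both endpoints' lists.
def create_graph_from_maze_alt (maze : List String) (freeChar : String) (startChar : String) (exitChar : String) : List (Int × Int × List (Int × Int)) :=
  let rows : Int := maze.length
  let cols : Int := ((PySem.List.pyGet? maze 0).getD "").toList.length
  let g0 : PySem.Dict (Int × Int) (List (Int × Int)) :=
    (PySem.List.pyRange 0 rows 1).foldl (fun g r =>
      (PySem.List.pyRange 0 cols 1).foldl (fun g c =>
        if pvCell maze freeChar startChar exitChar r c then g.insert (r, c) [] else g) g)
      PySem.Dict.empty
  let g1 := (PySem.List.pyRange 0 (rows - 1) 1).foldl (fun g r =>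
      (PySem.List.pyRange 0 cols 1).foldl (fun g c =>
        if g.contains (r, c) && g.contains (r + 1, c) then
          (g.modify (r, c) [] (· ++ [(r + 1, c)])).modify (r + 1, c) [] (· ++ [(r, c)])
        else g) g) g0
  let g2 := (PySem.List.pyRange 0 rows 1).foldl (fun g r =>
      (PySem.List.pyRange 0 (cols - 1) 1).foldl (fun g c =>
        if g.contains (r, c) && g.contains (r, c + 1) then
          (g.modify (r, c) [] (· ++ [(r, c + 1)])).modify (r, c + 1) [] (· ++ [(r, c)])
        else g) g) g1
  g2.items.map (fun p => (p.1.1, p.1.2, p.2))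

-- ===== PRECONDITION & SPEC =====
-- Pre_ excludes exactly the inputs where BOTH Pythons raise IndexError: the empty maze
-- (len(maze[0])) and mazes where some row is shorter than row 0 (maze[row][col]).
def Pre_create_graph_from_maze (maze : List String) (_freeChar : String) (_startChar : String) (_exitChar : String) : Prop :=
  maze ≠ [] ∧ ∀ s ∈ maze, (maze.headD "#").toList.length ≤ s.toList.length

instance (maze : List String) (freeChar : String) (startChar : String) (exitChar : String) : Decidable (Pre_create_graph_from_maze maze freeChar startChar exitChar) := by unfold Pre_create_graph_from_maze; infer_instance

def pvWitness_create_graph_from_maze : List String × String × String × String :=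
  (["S.#", ".E."], ".", "S", "E")

def Spec_create_graph_from_maze (maze : List String) (freeChar : String) (startChar : String) (exitChar : String) (out : List (Int × Int × List (Int × Int))) : Prop := out = create_graph_from_maze_alt maze freeChar startChar exitChar
instance (maze : List String) (freeChar : String) (startChar : String) (exitChar : String) (out : List (Int × Int × List (Int × Int))) : Decidable (Spec_create_graph_from_maze maze freeChar startChar exitChar out) := by unfold Spec_create_graph_from_maze; infer_instance

-- ===== CLAIM (what is proved, stated in full; the proofs are below) =====
def Claim_equal_create_graph_from_maze : Prop := ∀ (maze : List String) (freeChar : String) (startChar : String) (exitChar : String), Dom_create_graph_from_maze maze freeChar startChar exitChar → Pre_create_graph_from_maze maze freeChar startChar exitChar → Spec_create_graph_from_maze maze freeChar startChar exitChar (create_graph_from_maze maze freeChar startChar exitChar)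

-- ===== LEMMAS AND PROOFS =====

-- the row-major list of passable cells (the common key order of both programs)
def pvNodes (maze : List String) (f s e : String) : List (Int × Int) :=
  (PySem.List.pyRange 0 (maze.length : Int) 1).flatMap (fun r =>
    ((PySem.List.pyRange 0 (((PySem.List.pyGet? maze 0).getD "").toList.length : Int) 1).filter
      (fun c => pvCell maze f s e r c)).map (fun c => (r, c)))

-- one symmetric edge insertion of B's edge passes
def pvEdgeStep (g : PySem.Dict (Int × Int) (List (Int × Int))) (ed : (Int × Int) × (Int × Int)) :
    PySem.Dict (Int × Int) (List (Int × Int)) :=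
  if g.contains ed.1 && g.contains ed.2 then
    (g.modify ed.1 [] (· ++ [ed.2])).modify ed.2 [] (· ++ [ed.1])
  else g

-- what one edge contributes to the adjacency list of key k
def pvContrib (k : Int × Int) (ed : (Int × Int) × (Int × Int)) : List (Int × Int) :=
  (if k = ed.1 then [ed.2] else []) ++ (if k = ed.2 then [ed.1] else [])

def pvEdgesV (R C : Int) : List ((Int × Int) × (Int × Int)) :=
  (PySem.List.pyRange 0 (R - 1) 1).flatMap (fun r =>
    (PySem.List.pyRange 0 C 1).map (fun c => ((r, c), (r + 1, c))))

def pvEdgesH (R C : Int) : List ((Int × Int) × (Int × Int)) :=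
  (PySem.List.pyRange 0 R 1).flatMap (fun r =>
    (PySem.List.pyRange 0 (C - 1) 1).map (fun c => ((r, c), (r, c + 1))))

theorem pv_mem_nodes (maze : List String) (f s e : String) (a b : Int) :
    (a, b) ∈ pvNodes maze f s e ↔
      (0 ≤ a ∧ a < (maze.length : Int) ∧ 0 ≤ b ∧
        b < (((PySem.List.pyGet? maze 0).getD "").toList.length : Int) ∧
        pvCell maze f s e a b = true) := by
  unfold pvNodes
  simp only [List.mem_flatMap, List.mem_map, List.mem_filter, PySem.List.mem_pyRange_one]
  constructor
  · rintro ⟨r, ⟨hr0, hr1⟩, c, ⟨⟨hc0, hc1⟩, hcell⟩, heq⟩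
    cases heq
    exact ⟨hr0, hr1, hc0, hc1, hcell⟩
  · rintro ⟨h1, h2, h3, h4, h5⟩
    exact ⟨a, ⟨h1, h2⟩, b, ⟨⟨h3, h4⟩, h5⟩, rfl⟩

theorem pv_nodes_nodup (maze : List String) (f s e : String) : (pvNodes maze f s e).Nodup := by
  unfold pvNodes
  rw [List.nodup_flatMap]
  constructor
  · intro r _
    exact (((PySem.List.nodup_pyRange_one _ _).filter _).map
      (fun c c' h => by injection h))
  · refine ((PySem.List.nodup_pyRange_one _ _).imp ?_)
    intro r r' hne p hp hp'
    simp only [List.mem_map, List.mem_filter] at hp hp'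
    obtain ⟨c, _, rfl⟩ := hp
    obtain ⟨c', _, h⟩ := hp'
    exact hne (congrArg Prod.fst h.symm)

-- generic flatMap facts specialised to our index scans
theorem pv_flatMap_congr {α β : Type} {l : List α} {f g : α → List β}
    (h : ∀ x ∈ l, f x = g x) : l.flatMap f = l.flatMap g := by
  simp only [List.flatMap_def]
  rw [List.map_congr_left h]

theorem pv_flatMap_of_filter {α β : Type} (p : α → Bool) (f : α → List β) (l : List α) :
    (l.filter p).flatMap f = l.flatMap (fun x => if p x then f x else []) := by
  induction l with
  | nil => rfl
  | cons a t ih => by_cases h : p a = true <;> simp [h, ih]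

theorem pv_flatMap_nil {α β : Type} {l : List α} {f : α → List β}
    (h : ∀ x ∈ l, f x = []) : l.flatMap f = [] :=
  List.flatMap_eq_nil_iff.mpr h

theorem pv_flatMap_single {β : Type} (l : List Int) (hnd : l.Nodup) (b : Int) (L : List β) :
    l.flatMap (fun c => if c = b then L else []) = if b ∈ l then L else [] := by
  induction l with
  | nil => simp
  | cons a t ih =>
    obtain ⟨hat, hndt⟩ := List.nodup_cons.mp hnd
    by_cases hab : a = b
    · subst hab
      have ht : t.flatMap (fun c => if c = a then L else []) = [] :=
        pv_flatMap_nil (fun x hx => if_neg (fun (hxa : x = a) => hat (hxa ▸ hx)))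
      simp [ht]
    · have hba : ¬ b = a := fun h => hab h.symm
      simp [List.mem_cons, hab, hba, ih hndt]

theorem pv_flatMap_double {β : Type} (l : List Int) (hp : l.Pairwise (· < ·))
    (x y : Int) (hxy : x < y) (L1 L2 : List β) :
    l.flatMap (fun r => if r = x then L1 else if r = y then L2 else []) =
      (if x ∈ l then L1 else []) ++ (if y ∈ l then L2 else []) := by
  induction l with
  | nil => simp
  | cons a t ih =>
    obtain ⟨ha, hpt⟩ := List.pairwise_cons.mp hp
    rw [List.flatMap_cons, ih hpt]
    by_cases hax : a = x
    · subst hax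
      have hxt : a ∉ t := fun hm => absurd (ha a hm) (lt_irrefl a)
      have hyx : ¬ y = a := by omega
      simp [List.mem_cons, hxt, hyx]
    · by_cases hay : a = y
      · subst hay
        have hyt : a ∉ t := fun hm => absurd (ha a hm) (lt_irrefl a)
        have hxt : x ∉ t := fun hm => absurd (ha x hm) (by omega)
        have hxa : ¬ x = a := by omega
        simp [List.mem_cons, hyt, hxt, hxa, hax]
      · have hxa : ¬ x = a := fun h => hax h.symm
        have hya : ¬ y = a := fun h => hay h.symm
        simp [List.mem_cons, hax, hay, hxa, hya]

-- keys are untouched by an edge insertion, hence by a whole edge pass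
theorem pv_edgeStep_keys (g : PySem.Dict (Int × Int) (List (Int × Int)))
    (ed : (Int × Int) × (Int × Int)) : (pvEdgeStep g ed).keys = g.keys := by
  unfold pvEdgeStep
  by_cases h : (g.contains ed.1 && g.contains ed.2) = true
  · have h' := h
    rw [Bool.and_eq_true] at h'
    rw [if_pos h, PySem.Dict.keys_modify, PySem.Dict.keys_insert_of_contains _ _
        (by rw [PySem.Dict.contains_modify]; simp [h'.2]),
      PySem.Dict.keys_modify, PySem.Dict.keys_insert_of_contains _ _ h'.1]
  · rw [if_neg h]

theorem pv_edgeFold_keys (L : List ((Int × Int) × (Int × Int)))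
    (g : PySem.Dict (Int × Int) (List (Int × Int))) :
    (L.foldl pvEdgeStep g).keys = g.keys := by
  induction L generalizing g with
  | nil => rfl
  | cons ed t ih => rw [List.foldl_cons, ih, pv_edgeStep_keys]

theorem pv_edgeStep_getD (g : PySem.Dict (Int × Int) (List (Int × Int)))
    (ed : (Int × Int) × (Int × Int)) (k : Int × Int) :
    (pvEdgeStep g ed).getD k [] =
      g.getD k [] ++ (if g.contains ed.1 && g.contains ed.2 then pvContrib k ed else []) := by
  obtain ⟨e1, e2⟩ := ed
  unfold pvEdgeStep pvContrib
  dsimp only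
  by_cases h : (g.contains e1 && g.contains e2) = true
  · rw [if_pos h, if_pos h]
    simp only [PySem.Dict.getD_modify]
    split_ifs <;> subst_vars <;> simp [List.append_assoc] <;> simp_all
  · rw [if_neg h, if_neg h]; simp

theorem pv_edgeFold_getD (L : List ((Int × Int) × (Int × Int)))
    (g : PySem.Dict (Int × Int) (List (Int × Int))) (k : Int × Int) :
    (L.foldl pvEdgeStep g).getD k [] =
      g.getD k [] ++
        (L.filter (fun ed => g.contains ed.1 && g.contains ed.2)).flatMap (pvContrib k) := by
  induction L generalizing g with
  | nil => simp
  | cons ed t ih =>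
    rw [List.foldl_cons, ih]
    have hc : ∀ x, (pvEdgeStep g ed).contains x = g.contains x := by
      intro x
      rw [PySem.Dict.contains_eq_decide_mem_keys, PySem.Dict.contains_eq_decide_mem_keys,
        pv_edgeStep_keys]
    have hf : t.filter (fun e' => (pvEdgeStep g ed).contains e'.1 && (pvEdgeStep g ed).contains e'.2)
        = t.filter (fun e' => g.contains e'.1 && g.contains e'.2) :=
      List.filter_congr (fun x _ => by rw [hc x.1, hc x.2])
    rw [hf, pv_edgeStep_getD, List.filter_cons]
    by_cases hce : (g.contains ed.1 && g.contains ed.2) = true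
    · simp [hce, List.append_assoc]
    · simp [hce]

-- the nested key-registration loop is the insert-fold over pvNodes
theorem pv_fold_build (maze : List String) (f s e : String)
    (d : PySem.Dict (Int × Int) (List (Int × Int))) :
    (PySem.List.pyRange 0 (maze.length : Int) 1).foldl (fun g r =>
      (PySem.List.pyRange 0 (((PySem.List.pyGet? maze 0).getD "").toList.length : Int) 1).foldl
        (fun g c => if pvCell maze f s e r c then g.insert (r, c) [] else g) g) d
    = (pvNodes maze f s e).foldl (fun g k => g.insert k []) d := by
  unfold pvNodes
  rw [List.foldl_flatMap]
  apply PySem.List.foldl_congr_mem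
  intro acc r _
  rw [List.foldl_map, ← PySem.List.foldl_if_eq_foldl_filter]

-- the nested edge loops are folds of pvEdgeStep over the edge lists
theorem pv_fold_edgesV (A B : List Int) (d : PySem.Dict (Int × Int) (List (Int × Int))) :
    A.foldl (fun g r => B.foldl (fun g c =>
      if g.contains (r, c) && g.contains (r + 1, c) then
        (g.modify (r, c) [] (· ++ [(r + 1, c)])).modify (r + 1, c) [] (· ++ [(r, c)])
      else g) g) d
    = (A.flatMap (fun r => B.map (fun c => ((r, c), (r + 1, c))))).foldl pvEdgeStep d := by
  rw [List.foldl_flatMap]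
  apply PySem.List.foldl_congr_mem
  intro acc r _
  rw [List.foldl_map]
  rfl

theorem pv_fold_edgesH (A B : List Int) (d : PySem.Dict (Int × Int) (List (Int × Int))) :
    A.foldl (fun g r => B.foldl (fun g c =>
      if g.contains (r, c) && g.contains (r, c + 1) then
        (g.modify (r, c) [] (· ++ [(r, c + 1)])).modify (r, c + 1) [] (· ++ [(r, c)])
      else g) g) d
    = (A.flatMap (fun r => B.map (fun c => ((r, c), (r, c + 1))))).foldl pvEdgeStep d := by
  rw [List.foldl_flatMap]
  apply PySem.List.foldl_congr_mem
  intro acc r _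
  rw [List.foldl_map]
  rfl

-- value of the vertical pass at a node (a, b): up neighbor, then down neighbor
theorem pv_vert_value (maze : List String) (f s e : String) (a b : Int)
    (hk : (a, b) ∈ pvNodes maze f s e) :
    ((pvEdgesV (maze.length : Int) (((PySem.List.pyGet? maze 0).getD "").toList.length : Int)).filter
        (fun ed => decide (ed.1 ∈ pvNodes maze f s e) && decide (ed.2 ∈ pvNodes maze f s e))).flatMap
      (pvContrib (a, b)) =
    (if (a - 1, b) ∈ pvNodes maze f s e then [(a - 1, b)] else []) ++
      (if (a + 1, b) ∈ pvNodes maze f s e then [(a + 1, b)] else []) := by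
  obtain ⟨ha0, haR, hb0, hbC, -⟩ := (pv_mem_nodes maze f s e a b).mp hk
  unfold pvEdgesV
  rw [pv_flatMap_of_filter, List.flatMap_assoc]
  simp only [List.flatMap_map]
  rw [pv_flatMap_congr (g := fun r =>
    if r = a - 1 then (if (a - 1, b) ∈ pvNodes maze f s e then [(a - 1, b)] else [])
    else if r = a then (if (a + 1, b) ∈ pvNodes maze f s e then [(a + 1, b)] else [])
    else []) ?_]
  · rw [pv_flatMap_double _ (PySem.List.pairwise_lt_pyRange_one _ _) (a - 1) a (by omega)]
    have hup : (if a - 1 ∈ PySem.List.pyRange 0 ((maze.length : Int) - 1) 1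
        then (if (a - 1, b) ∈ pvNodes maze f s e then [(a - 1, b)] else []) else [])
        = (if (a - 1, b) ∈ pvNodes maze f s e then [(a - 1, b)] else []) := by
      by_cases hm : (a - 1, b) ∈ pvNodes maze f s e
      · obtain ⟨h1, h2, -, -, -⟩ := (pv_mem_nodes maze f s e (a - 1) b).mp hm
        rw [if_pos (PySem.List.mem_pyRange_one.mpr ⟨by omega, by omega⟩)]
      · simp [hm]
    have hdn : (if a ∈ PySem.List.pyRange 0 ((maze.length : Int) - 1) 1
        then (if (a + 1, b) ∈ pvNodes maze f s e then [(a + 1, b)] else []) else [])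
        = (if (a + 1, b) ∈ pvNodes maze f s e then [(a + 1, b)] else []) := by
      by_cases hm : (a + 1, b) ∈ pvNodes maze f s e
      · obtain ⟨h1, h2, -, -, -⟩ := (pv_mem_nodes maze f s e (a + 1) b).mp hm
        rw [if_pos (PySem.List.mem_pyRange_one.mpr ⟨by omega, by omega⟩)]
      · simp [hm]
    rw [hup, hdn]
  · intro r _
    dsimp only
    by_cases hr1 : r = a - 1
    · subst hr1
      have heq : ∀ c, (if decide ((a - 1, c) ∈ pvNodes maze f s e) &&
            decide ((a - 1 + 1, c) ∈ pvNodes maze f s e)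
          then pvContrib (a, b) ((a - 1, c), (a - 1 + 1, c)) else [])
          = (if c = b then (if (a - 1, b) ∈ pvNodes maze f s e then [(a - 1, b)] else []) else []) := by
        intro c
        by_cases hc : c = b
        · subst hc
          rw [show a - 1 + 1 = a by omega]
          have hcon : pvContrib (a, c) ((a - 1, c), (a, c)) = [(a - 1, c)] := by
            simp [pvContrib, Prod.mk.injEq, (show a ≠ a - 1 by omega)]
          simp [hcon, hk]
        · rw [show a - 1 + 1 = a by omega]
          have hcon : pvContrib (a, b) ((a - 1, c), (a, c)) = [] := by
            simp [pvContrib, Prod.mk.injEq, (show a ≠ a - 1 by omega),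
              (show b ≠ c from fun hh => hc hh.symm)]
          simp [hcon, hc]
      rw [pv_flatMap_congr (fun c _ => heq c),
        pv_flatMap_single _ (PySem.List.nodup_pyRange_one _ _) b,
        if_pos (PySem.List.mem_pyRange_one.mpr ⟨hb0, hbC⟩)]
      simp
    · by_cases hr2 : r = a
      · subst hr2
        have heq : ∀ c, (if decide ((r, c) ∈ pvNodes maze f s e) &&
              decide ((r + 1, c) ∈ pvNodes maze f s e)
            then pvContrib (r, b) ((r, c), (r + 1, c)) else [])
            = (if c = b then (if (r + 1, b) ∈ pvNodes maze f s e then [(r + 1, b)] else []) else []) := by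
          intro c
          by_cases hc : c = b
          · subst hc
            have hcon : pvContrib (r, c) ((r, c), (r + 1, c)) = [(r + 1, c)] := by
              simp [pvContrib, Prod.mk.injEq, (show r ≠ r + 1 by omega)]
            simp [hcon, hk]
          · have hcon : pvContrib (r, b) ((r, c), (r + 1, c)) = [] := by
              simp [pvContrib, Prod.mk.injEq, (show b ≠ c from fun hh => hc hh.symm)]
            simp [hcon, hc]
        rw [pv_flatMap_congr (fun c _ => heq c),
          pv_flatMap_single _ (PySem.List.nodup_pyRange_one _ _) b,
          if_pos (PySem.List.mem_pyRange_one.mpr ⟨hb0, hbC⟩)]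
        simp [(show ¬ r = r - 1 by omega)]
      · have hz : (PySem.List.pyRange 0 (((PySem.List.pyGet? maze 0).getD "").toList.length : Int) 1).flatMap
            (fun c => if decide ((r, c) ∈ pvNodes maze f s e) &&
                decide ((r + 1, c) ∈ pvNodes maze f s e)
              then pvContrib (a, b) ((r, c), (r + 1, c)) else []) = [] := by
          apply pv_flatMap_nil
          intro c _
          have hcon : pvContrib (a, b) ((r, c), (r + 1, c)) = [] := by
            simp [pvContrib, Prod.mk.injEq, (show a ≠ r from fun hh => hr2 hh.symm),
              (show a ≠ r + 1 from fun hh => hr1 (by omega))]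
          simp [hcon]
        rw [hz]
        simp [hr1, hr2]

-- value of the horizontal pass at a node (a, b): left neighbor, then right neighbor
theorem pv_horiz_value (maze : List String) (f s e : String) (a b : Int)
    (hk : (a, b) ∈ pvNodes maze f s e) :
    ((pvEdgesH (maze.length : Int) (((PySem.List.pyGet? maze 0).getD "").toList.length : Int)).filter
        (fun ed => decide (ed.1 ∈ pvNodes maze f s e) && decide (ed.2 ∈ pvNodes maze f s e))).flatMap
      (pvContrib (a, b)) =
    (if (a, b - 1) ∈ pvNodes maze f s e then [(a, b - 1)] else []) ++
      (if (a, b + 1) ∈ pvNodes maze f s e then [(a, b + 1)] else []) := by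
  obtain ⟨ha0, haR, hb0, hbC, -⟩ := (pv_mem_nodes maze f s e a b).mp hk
  unfold pvEdgesH
  rw [pv_flatMap_of_filter, List.flatMap_assoc]
  simp only [List.flatMap_map]
  rw [pv_flatMap_congr (g := fun r =>
    if r = a then
      ((if (a, b - 1) ∈ pvNodes maze f s e then [(a, b - 1)] else []) ++
        (if (a, b + 1) ∈ pvNodes maze f s e then [(a, b + 1)] else []))
    else []) ?_]
  · rw [pv_flatMap_single _ (PySem.List.nodup_pyRange_one _ _) a,
      if_pos (PySem.List.mem_pyRange_one.mpr ⟨ha0, haR⟩)]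
  · intro r _
    dsimp only
    by_cases hr : r = a
    · subst hr
      have heq : ∀ c, (if decide ((r, c) ∈ pvNodes maze f s e) &&
            decide ((r, c + 1) ∈ pvNodes maze f s e)
          then pvContrib (r, b) ((r, c), (r, c + 1)) else [])
          = (if c = b - 1 then (if (r, b - 1) ∈ pvNodes maze f s e then [(r, b - 1)] else [])
             else if c = b then (if (r, b + 1) ∈ pvNodes maze f s e then [(r, b + 1)] else [])
             else []) := by
        intro c
        by_cases hc1 : c = b - 1
        · subst hc1
          rw [show b - 1 + 1 = b by omega]
          have hcon : pvContrib (r, b) ((r, b - 1), (r, b)) = [(r, b - 1)] := by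
            simp [pvContrib, Prod.mk.injEq, (show b ≠ b - 1 by omega)]
          simp [hcon, hk]
        · by_cases hc2 : c = b
          · subst hc2
            have hcon : pvContrib (r, c) ((r, c), (r, c + 1)) = [(r, c + 1)] := by
              simp [pvContrib, Prod.mk.injEq, (show c ≠ c + 1 by omega)]
            simp [hcon, hk, hc1]
          · have hcon : pvContrib (r, b) ((r, c), (r, c + 1)) = [] := by
              simp [pvContrib, Prod.mk.injEq, (show b ≠ c from fun hh => hc2 hh.symm),
                (show b ≠ c + 1 from fun hh => hc1 (by omega))]
            simp [hcon, hc1, hc2]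
      rw [pv_flatMap_congr (fun c _ => heq c),
        pv_flatMap_double _ (PySem.List.pairwise_lt_pyRange_one _ _) (b - 1) b (by omega)]
      have hl : (if b - 1 ∈ PySem.List.pyRange 0 ((((PySem.List.pyGet? maze 0).getD "").toList.length : Int) - 1) 1
          then (if (r, b - 1) ∈ pvNodes maze f s e then [(r, b - 1)] else []) else [])
          = (if (r, b - 1) ∈ pvNodes maze f s e then [(r, b - 1)] else []) := by
        by_cases hm : (r, b - 1) ∈ pvNodes maze f s e
        · obtain ⟨-, -, h3, h4, -⟩ := (pv_mem_nodes maze f s e r (b - 1)).mp hm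
          rw [if_pos (PySem.List.mem_pyRange_one.mpr ⟨by omega, by omega⟩)]
        · simp [hm]
      have hrt : (if b ∈ PySem.List.pyRange 0 ((((PySem.List.pyGet? maze 0).getD "").toList.length : Int) - 1) 1
          then (if (r, b + 1) ∈ pvNodes maze f s e then [(r, b + 1)] else []) else [])
          = (if (r, b + 1) ∈ pvNodes maze f s e then [(r, b + 1)] else []) := by
        by_cases hm : (r, b + 1) ∈ pvNodes maze f s e
        · obtain ⟨-, -, h3, h4, -⟩ := (pv_mem_nodes maze f s e r (b + 1)).mp hm
          rw [if_pos (PySem.List.mem_pyRange_one.mpr ⟨by omega, by omega⟩)]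
        · simp [hm]
      rw [hl, hrt]
      simp
    · have hz : (PySem.List.pyRange 0 ((((PySem.List.pyGet? maze 0).getD "").toList.length : Int) - 1) 1).flatMap
          (fun c => if decide ((r, c) ∈ pvNodes maze f s e) &&
              decide ((r, c + 1) ∈ pvNodes maze f s e)
            then pvContrib (a, b) ((r, c), (r, c + 1)) else []) = [] := by
        apply pv_flatMap_nil
        intro c _
        have hcon : pvContrib (a, b) ((r, c), (r, c + 1)) = [] := by
          simp [pvContrib, Prod.mk.injEq, (show a ≠ r from fun hh => hr hh.symm)]
        simp [hcon]
      rw [hz]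
      simp [hr]

-- characterisation of port A: row-major nodes, each with the candidate filter
theorem pv_A_eq (maze : List String) (f s e : String) :
    create_graph_from_maze maze f s e = (pvNodes maze f s e).map (fun rc =>
      (rc.1, rc.2,
        ([(rc.1 - 1, rc.2), (rc.1 + 1, rc.2), (rc.1, rc.2 - 1), (rc.1, rc.2 + 1)] : List (Int × Int)).filter
          (fun n => decide (n ∈ pvNodes maze f s e)))) := by
  unfold create_graph_from_maze
  dsimp only
  have hpred : ∀ nb : Int × Int,
      ((0 ≤ nb.1 && nb.1 < (maze.length : Int) && 0 ≤ nb.2 &&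
        nb.2 < (((PySem.List.pyGet? maze 0).getD "").toList.length : Int) &&
        pvCell maze f s e nb.1 nb.2) : Bool)
      = decide (nb ∈ pvNodes maze f s e) := by
    rintro ⟨x, y⟩
    rw [Bool.eq_iff_iff]
    simp only [Bool.and_eq_true, decide_eq_true_eq, pv_mem_nodes]
    tauto
  have hinner : ∀ (row : Int) (g : List (Int × Int × List (Int × Int))),
      (PySem.List.pyRange 0 (((PySem.List.pyGet? maze 0).getD "").toList.length : Int) 1).foldl
        (fun graph col =>
          if pvCell maze f s e row col then
            graph ++ [(row, col,
              ([(row - 1, col), (row + 1, col), (row, col - 1), (row, col + 1)] : List (Int × Int)).foldl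
                (fun acc nb => if 0 ≤ nb.1 && nb.1 < (maze.length : Int) && 0 ≤ nb.2 &&
                    nb.2 < (((PySem.List.pyGet? maze 0).getD "").toList.length : Int) &&
                    pvCell maze f s e nb.1 nb.2
                  then acc ++ [nb] else acc) [])]
          else graph) g
      = g ++ (((PySem.List.pyRange 0 (((PySem.List.pyGet? maze 0).getD "").toList.length : Int) 1).filter
            (fun c => pvCell maze f s e row c)).map (fun c => (row, c))).map
          (fun rc => (rc.1, rc.2,
            ([(rc.1 - 1, rc.2), (rc.1 + 1, rc.2), (rc.1, rc.2 - 1), (rc.1, rc.2 + 1)] : List (Int × Int)).filter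
              (fun n => decide (n ∈ pvNodes maze f s e)))) := by
    intro row g
    rw [PySem.List.foldl_append_if (fun c => pvCell maze f s e row c)
      (fun col => ((row, col,
        ([(row - 1, col), (row + 1, col), (row, col - 1), (row, col + 1)] : List (Int × Int)).foldl
          (fun acc nb => if 0 ≤ nb.1 && nb.1 < (maze.length : Int) && 0 ≤ nb.2 &&
              nb.2 < (((PySem.List.pyGet? maze 0).getD "").toList.length : Int) &&
              pvCell maze f s e nb.1 nb.2
            then acc ++ [nb] else acc) []) : Int × Int × List (Int × Int)))]
    congr 1
    rw [List.map_map]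
    apply List.map_congr_left
    intro c _
    simp only [Function.comp]
    congr 2
    rw [PySem.List.foldl_append_if_eq_filter]
    simp only [List.nil_append]
    exact List.filter_congr (fun nb _ => hpred nb)
  calc
    (PySem.List.pyRange 0 (maze.length : Int) 1).foldl (fun graph row =>
      (PySem.List.pyRange 0 (((PySem.List.pyGet? maze 0).getD "").toList.length : Int) 1).foldl
        (fun graph col =>
          if pvCell maze f s e row col then
            graph ++ [(row, col,
              ([(row - 1, col), (row + 1, col), (row, col - 1), (row, col + 1)] : List (Int × Int)).foldl
                (fun acc nb => if 0 ≤ nb.1 && nb.1 < (maze.length : Int) && 0 ≤ nb.2 &&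
                    nb.2 < (((PySem.List.pyGet? maze 0).getD "").toList.length : Int) &&
                    pvCell maze f s e nb.1 nb.2
                  then acc ++ [nb] else acc) [])]
          else graph) graph) []
      = (PySem.List.pyRange 0 (maze.length : Int) 1).foldl (fun g row =>
          g ++ (((PySem.List.pyRange 0 (((PySem.List.pyGet? maze 0).getD "").toList.length : Int) 1).filter
              (fun c => pvCell maze f s e row c)).map (fun c => (row, c))).map
            (fun rc => (rc.1, rc.2,
              ([(rc.1 - 1, rc.2), (rc.1 + 1, rc.2), (rc.1, rc.2 - 1), (rc.1, rc.2 + 1)] : List (Int × Int)).filter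
                (fun n => decide (n ∈ pvNodes maze f s e))))) [] := by
          apply PySem.List.foldl_congr_mem
          intro g row _
          exact hinner row g
    _ = _ := by
          rw [PySem.List.foldl_append_eq_flatMap, List.nil_append]
          unfold pvNodes
          rw [List.map_flatMap]

-- characterisation of port B: same node order, adjacency assembled edge-wise
theorem pv_B_eq (maze : List String) (f s e : String) :
    create_graph_from_maze_alt maze f s e = (pvNodes maze f s e).map (fun k =>
      (k.1, k.2,
        ((if (k.1 - 1, k.2) ∈ pvNodes maze f s e then [(k.1 - 1, k.2)] else []) ++
          (if (k.1 + 1, k.2) ∈ pvNodes maze f s e then [(k.1 + 1, k.2)] else [])) ++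
        ((if (k.1, k.2 - 1) ∈ pvNodes maze f s e then [(k.1, k.2 - 1)] else []) ++
          (if (k.1, k.2 + 1) ∈ pvNodes maze f s e then [(k.1, k.2 + 1)] else [])))) := by
  unfold create_graph_from_maze_alt
  dsimp only
  rw [pv_fold_build, pv_fold_edgesV, pv_fold_edgesH]
  have hitems0 : ((pvNodes maze f s e).foldl (fun g k => g.insert k []) PySem.Dict.empty).items
      = (pvNodes maze f s e).map (fun k => (k, ([] : List (Int × Int)))) := by
    rw [PySem.Dict.items_foldl_insert_fresh (pvNodes maze f s e) (fun k => k)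
      (fun _ => ([] : List (Int × Int))) PySem.Dict.empty
      (fun a _ => PySem.Dict.contains_empty a)
      (by simpa using pv_nodes_nodup maze f s e)]
    rfl
  have hkeys0 : ((pvNodes maze f s e).foldl (fun g k => g.insert k [])
      (PySem.Dict.empty : PySem.Dict (Int × Int) (List (Int × Int)))).keys
      = pvNodes maze f s e := by
    show (((pvNodes maze f s e).foldl (fun g k => g.insert k [])
      (PySem.Dict.empty : PySem.Dict (Int × Int) (List (Int × Int)))).items.map Prod.fst)
      = pvNodes maze f s e
    rw [hitems0, List.map_map]
    exact List.map_id _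
  set g0 : PySem.Dict (Int × Int) (List (Int × Int)) :=
    (pvNodes maze f s e).foldl (fun g k => g.insert k []) PySem.Dict.empty with hg0
  have hcont0 : ∀ x, g0.contains x = decide (x ∈ pvNodes maze f s e) := by
    intro x
    rw [PySem.Dict.contains_eq_decide_mem_keys, hkeys0]
  have hget0 : ∀ k ∈ pvNodes maze f s e, g0.getD k [] = [] := by
    intro k hkm
    exact PySem.Dict.getD_of_mem_items g0
      (by rw [hitems0]; exact List.mem_map.mpr ⟨k, hkm, rfl⟩)
      (by rw [hkeys0]; exact pv_nodes_nodup maze f s e) []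
  set Ev := (PySem.List.pyRange 0 ((maze.length : Int) - 1) 1).flatMap (fun r =>
    (PySem.List.pyRange 0 (((PySem.List.pyGet? maze 0).getD "").toList.length : Int) 1).map
      (fun c => ((r, c), (r + 1, c)))) with hEv
  set Eh := (PySem.List.pyRange 0 (maze.length : Int) 1).flatMap (fun r =>
    (PySem.List.pyRange 0 ((((PySem.List.pyGet? maze 0).getD "").toList.length : Int) - 1) 1).map
      (fun c => ((r, c), (r, c + 1)))) with hEh
  set g1 := Ev.foldl pvEdgeStep g0 with hg1
  have hkeys1 : g1.keys = pvNodes maze f s e := by rw [hg1, pv_edgeFold_keys, hkeys0]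
  have hcont1 : ∀ x, g1.contains x = decide (x ∈ pvNodes maze f s e) := by
    intro x
    rw [PySem.Dict.contains_eq_decide_mem_keys, hkeys1]
  set g2 := Eh.foldl pvEdgeStep g1 with hg2
  have hkeys2 : g2.keys = pvNodes maze f s e := by rw [hg2, pv_edgeFold_keys, hkeys1]
  have hitems2 : g2.items = (pvNodes maze f s e).map (fun k => (k, g2.getD k [])) := by
    rw [PySem.Dict.items_eq_map_keys g2
      (by rw [hkeys2]; exact pv_nodes_nodup maze f s e) [], hkeys2]
  rw [hitems2, List.map_map]
  apply List.map_congr_left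
  rintro ⟨a, b⟩ hkm
  simp only [Function.comp]
  have hval2 : g2.getD (a, b) [] = g1.getD (a, b) [] ++
      ((if (a, b - 1) ∈ pvNodes maze f s e then [(a, b - 1)] else []) ++
        (if (a, b + 1) ∈ pvNodes maze f s e then [(a, b + 1)] else [])) := by
    rw [hg2, pv_edgeFold_getD]
    congr 1
    rw [List.filter_congr (fun ed _ => by rw [hcont1 ed.1, hcont1 ed.2])]
    exact pv_horiz_value maze f s e a b hkm
  have hval1 : g1.getD (a, b) [] =
      ((if (a - 1, b) ∈ pvNodes maze f s e then [(a - 1, b)] else []) ++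
        (if (a + 1, b) ∈ pvNodes maze f s e then [(a + 1, b)] else [])) := by
    rw [hg1, pv_edgeFold_getD, hget0 (a, b) hkm, List.nil_append]
    rw [List.filter_congr (fun ed _ => by rw [hcont0 ed.1, hcont0 ed.2])]
    exact pv_vert_value maze f s e a b hkm
  rw [hval2, hval1]

-- ===== VERDICT =====
theorem create_graph_from_maze_spec : Claim_equal_create_graph_from_maze := by
  intro maze freeChar startChar exitChar _ _
  unfold Spec_create_graph_from_maze
  rw [pv_A_eq, pv_B_eq]
  apply List.map_congr_left
  rintro ⟨a, b⟩ hkm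
  dsimp only
  simp only [Prod.mk.injEq, true_and]
  by_cases h1 : (a - 1, b) ∈ pvNodes maze freeChar startChar exitChar <;>
    by_cases h2 : (a + 1, b) ∈ pvNodes maze freeChar startChar exitChar <;>
    by_cases h3 : (a, b - 1) ∈ pvNodes maze freeChar startChar exitChar <;>
    by_cases h4 : (a, b + 1) ∈ pvNodes maze freeChar startChar exitChar <;>
    simp [h1, h2, h3, h4]
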